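-- pv_equiv track=rewrite | github.com/mjapkim/EN601647_final_scan_contaminants | minhash/create_kmers_from_seq.py | make_kmer_table
-- ===== SOURCE A (Python) =====
-- def make_kmer_table(seqs, k):
--     """ Given read dictionary and integer k, return a dictionary that
--     maps each k-mer to the set of names of reads containing the k-mer. """
--     table = {}
--     # for each 101-mer in genome
--     for name, seq in seqs.items():
--         for i in range(0, len(seq) - k + 1):
--             kmer = seq[i:i+k]
--             if kmer not in table:
--                 table[kmer] = set()
--             table[kmer].add(name)
--     for key in list(table):
--         val = table[key]
--         if len(val) < 2:
--             del table[key]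
--     return table
-- ===== SOURCE B (Python) =====
-- def make_kmer_table(seqs, k):
--     """ Given read dictionary and integer k, return a dictionary that
--     maps each k-mer to the set of names of reads containing the k-mer. """
--     reads = [(name, [seq[i:i+k] for i in range(len(seq) - k + 1)])
--              for name, seq in seqs.items()]
--     kmers = list(dict.fromkeys(w for _, ws in reads for w in ws))
--     table = {}
--     for km in kmers:
--         names = [name for name, ws in reads if km in ws]
--         if len(names) >= 2:
--             table[km] = set(names)
--     return table
-- ===== Notes on version B (the rewrite author's own statement) =====
-- stated objective: alternative
-- what changed: B inverts the loop nesting: it slices every read into its window list once, dedups the window stream into the distinct k-mers in first-occurrence order, and builds the table kmer-major by scanning the reads per k-mer and keeping those hit by at least two reads, instead of A's read-major streaming pass that grows a dict of sets and then deletes the small entries; Pre_ only states that seqs, being a Python dict, has pairwise-distinct keys.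
import Mathlib
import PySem

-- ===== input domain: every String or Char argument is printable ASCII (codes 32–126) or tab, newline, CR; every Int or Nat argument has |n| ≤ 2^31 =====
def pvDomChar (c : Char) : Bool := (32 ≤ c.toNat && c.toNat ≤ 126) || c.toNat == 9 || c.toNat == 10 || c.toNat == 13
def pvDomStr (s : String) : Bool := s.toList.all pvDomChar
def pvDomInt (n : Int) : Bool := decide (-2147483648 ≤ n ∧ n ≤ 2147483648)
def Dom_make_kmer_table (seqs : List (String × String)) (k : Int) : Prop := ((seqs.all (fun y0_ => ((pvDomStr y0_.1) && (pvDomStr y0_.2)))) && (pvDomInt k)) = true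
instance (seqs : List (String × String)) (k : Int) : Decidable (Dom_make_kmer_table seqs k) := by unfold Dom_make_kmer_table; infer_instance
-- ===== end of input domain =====

-- B inverts the loop nesting: instead of A's read-major streaming pass that grows a dict of
-- sets and then deletes the small entries, B lists each read's windows once, dedups the
-- window stream into the distinct k-mers in first-occurrence order, and builds the table
-- kmer-major by scanning the reads per k-mer (objective: alternative decomposition).

-- ===== PORT A =====
def make_kmer_table (seqs : List (String × String)) (k : Int) : List (String × List String) :=
  let table : PySem.Dict String (List String) :=
    seqs.foldl (fun table r =>
      (PySem.List.pyRange 0 (PySem.Str.len r.2 - k + 1) 1).foldl (fun table i =>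
        let kmer := PySem.Str.slice r.2 (some i) (some (i + k))
        let table := if table.contains kmer then table else table.insert kmer []
        table.modify kmer [] (fun s => PySem.Set.add s r.1)) table)
      PySem.Dict.empty
  -- 'for key in list(table): val = table[key]; if len(val) < 2: del table[key]'
  -- (table[key] never raises here: each key of the snapshot is still present when visited)
  (table.keys.foldl (fun t key =>
      let val := t.getD key []
      if val.length < 2 then t.erase key else t) table).items

-- ===== PORT B =====
def make_kmer_table_alt (seqs : List (String × String)) (k : Int) : List (String × List String) :=
  let reads := seqs.map (fun r =>
    (r.1, (PySem.List.pyRange 0 (PySem.Str.len r.2 - k + 1) 1).map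
            (fun i => PySem.Str.slice r.2 (some i) (some (i + k)))))
  let kmers := PySem.List.dedup (reads.flatMap (fun r => r.2))
  kmers.foldl (fun table km =>
    let names := (reads.filter (fun r => r.2.contains km)).map (fun r => r.1)
    if 2 ≤ names.length then table ++ [(km, PySem.Set.ofList names)] else table) []

-- ===== PRECONDITION & SPEC =====
-- seqs stands for a Python dict, whose items never repeat a key: Pre_ only rules out
-- association lists with a duplicated read name, which no dict argument can produce.
def Pre_make_kmer_table (seqs : List (String × String)) (k : Int) : Prop :=
  (seqs.map Prod.fst).Nodup
instance (seqs : List (String × String)) (k : Int) : Decidable (Pre_make_kmer_table seqs k) := by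
  unfold Pre_make_kmer_table; infer_instance
def pvWitness_make_kmer_table : (List (String × String)) × Int := ([("r1", "AC"), ("r2", "CA")], 1)

def Spec_make_kmer_table (seqs : List (String × String)) (k : Int) (out : List (String × List String)) : Prop := out = make_kmer_table_alt seqs k
instance (seqs : List (String × String)) (k : Int) (out : List (String × List String)) : Decidable (Spec_make_kmer_table seqs k out) := by unfold Spec_make_kmer_table; infer_instance

-- ===== CLAIM (what is proved, stated in full; the proofs are below) =====
def Claim_equal_make_kmer_table : Prop := ∀ (seqs : List (String × String)) (k : Int), Dom_make_kmer_table seqs k → Pre_make_kmer_table seqs k → Spec_make_kmer_table seqs k (make_kmer_table seqs k)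

-- ===== LEMMAS AND PROOFS =====

-- the (name, windows of the read) pair both ports compute for a read
def pvWin (k : Int) (r : String × String) : String × List String :=
  (r.1, (PySem.List.pyRange 0 (PySem.Str.len r.2 - k + 1) 1).map
          (fun i => PySem.Str.slice r.2 (some i) (some (i + k))))

def pvStream (reads : List (String × List String)) : List String := reads.flatMap (fun r => r.2)

def pvNames (reads : List (String × List String)) (km : String) : List String :=
  (reads.filter (fun r => r.2.contains km)).map (fun r => r.1)

-- the table A has built after the whole first pass
def pvTab (reads : List (String × List String)) : List (String × List String) :=
  (PySem.List.dedup (pvStream reads)).map (fun km => (km, PySem.Set.ofList (pvNames reads km)))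

-- the table A holds mid-way through read (nm, ws), after the window prefix u of ws
def pvH (reads : List (String × List String)) (nm : String) (u : List String) :
    List (String × List String) :=
  (PySem.List.dedup (pvStream reads ++ u)).map
    (fun km => (km, PySem.Set.ofList (pvNames reads km ++ if km ∈ u then [nm] else [])))

-- A's inner-loop body
def pvAdd (nm : String) (d : PySem.Dict String (List String)) (w : String) :
    PySem.Dict String (List String) :=
  let d := if d.contains w then d else d.insert w []
  d.modify w [] (fun s => PySem.Set.add s nm)

-- A's deletion-loop body
def pvDel (t : PySem.Dict String (List String)) (key : String) :
    PySem.Dict String (List String) :=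
  let val := t.getD key []
  if val.length < 2 then t.erase key else t

lemma pv_keys_mk_map (D : List String) (g : String → List String) :
    (PySem.Dict.mk (D.map (fun km => (km, g km)))).keys = D := by
  simp [PySem.Dict.keys, List.map_map, Function.comp_def]

lemma pv_contains_mk_map_iff (D : List String) (g : String → List String) (w : String) :
    (PySem.Dict.mk (D.map (fun km => (km, g km)))).contains w = true ↔ w ∈ D := by
  simp only [PySem.Dict.contains, PySem.Dict.items, List.any_eq_true, List.mem_map]
  constructor
  · rintro ⟨p, ⟨km, hkm, rfl⟩, hb⟩
    exact (beq_iff_eq.mp hb) ▸ hkm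
  · intro h; exact ⟨(w, g w), ⟨w, h, rfl⟩, by simp⟩

lemma pv_get?_mk_map_of_mem (D : List String) (g : String → List String) (w : String)
    (hD : D.Nodup) (hw : w ∈ D) :
    (PySem.Dict.mk (D.map (fun km => (km, g km)))).get? w = some (g w) := by
  apply PySem.Dict.get?_of_mem_items
  · exact List.mem_map_of_mem hw
  · rw [pv_keys_mk_map]; exact hD

lemma pv_insert_mk_map_of_mem (D : List String) (g : String → List String) (w : String)
    (hw : w ∈ D) (v : List String) :
    (PySem.Dict.mk (D.map (fun km => (km, g km)))).insert w v =
      PySem.Dict.mk (D.map (fun km => if km = w then (w, v) else (km, g km))) := by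
  have hc : (PySem.Dict.mk (D.map (fun km => (km, g km)))).contains w = true :=
    (pv_contains_mk_map_iff D g w).mpr hw
  simp only [PySem.Dict.insert, hc, if_true, List.map_map]
  congr 1
  apply List.map_congr_left
  intro km _
  by_cases h : km = w <;> simp [Function.comp_def, h]

lemma pv_insert_mk_map_of_not_mem (D : List String) (g : String → List String) (w : String)
    (hw : w ∉ D) (v : List String) :
    (PySem.Dict.mk (D.map (fun km => (km, g km)))).insert w v =
      PySem.Dict.mk (D.map (fun km => (km, g km)) ++ [(w, v)]) := by
  have hc : (PySem.Dict.mk (D.map (fun km => (km, g km)))).contains w = false := by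
    rw [Bool.eq_false_iff]
    intro h; exact hw ((pv_contains_mk_map_iff D g w).mp h)
  simp [PySem.Dict.insert, hc]

lemma pvH_nil (reads : List (String × List String)) (nm : String) :
    pvH reads nm [] = pvTab reads := by
  simp [pvH, pvTab]

lemma pvNames_eq_nil_of_not_mem_stream (reads : List (String × List String)) (w : String)
    (hw : w ∉ pvStream reads) : pvNames reads w = [] := by
  simp only [pvStream, List.mem_flatMap, not_exists, not_and] at hw
  simp only [pvNames, List.map_eq_nil_iff, List.filter_eq_nil_iff]
  intro r hr
  simp only [List.contains_iff_mem]
  exact fun h => (hw r hr) h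

-- within one read, window w = union of the current value with {nm}, in every branch
lemma pvAdd_pvH (reads : List (String × List String)) (nm : String) (u : List String)
    (w : String) :
    pvAdd nm ⟨pvH reads nm u⟩ w = ⟨pvH reads nm (u ++ [w])⟩ := by
  have hD : (PySem.List.dedup (pvStream reads ++ u)).Nodup := PySem.List.nodup_dedup _
  by_cases hw : w ∈ pvStream reads ++ u
  · -- the key is already present: A modifies it in place
    have hwD : w ∈ PySem.List.dedup (pvStream reads ++ u) := by
      rwa [PySem.List.mem_dedup]
    have hc : (PySem.Dict.mk (pvH reads nm u)).contains w = true := by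
      simp only [pvH]; exact (pv_contains_mk_map_iff _ _ w).mpr hwD
    simp only [pvAdd, hc, if_true, PySem.Dict.modify, PySem.Dict.getD]
    simp only [pvH]
    rw [pv_get?_mk_map_of_mem _ _ w hD hwD]
    rw [pv_insert_mk_map_of_mem _ _ w hwD]
    have hdd : PySem.List.dedup (pvStream reads ++ (u ++ [w])) =
        PySem.List.dedup (pvStream reads ++ u) := by
      rw [← List.append_assoc]
      simp only [PySem.List.dedup_eq_ofList, PySem.Set.ofList_append_singleton]
      exact PySem.Set.add_of_mem (by rwa [PySem.Set.mem_ofList])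
    rw [hdd]
    congr 1
    apply List.map_congr_left
    intro km hkm
    by_cases hk : km = w
    · subst hk
      simp only [if_pos rfl, Option.getD_some]
      have hmem : km ∈ u ++ [km] := by simp
      rw [if_pos hmem]
      by_cases hu : km ∈ u
      · rw [if_pos hu]
        exact congrArg (fun v => (km, v))
          (PySem.Set.add_of_mem (by simp [PySem.Set.mem_ofList]))
      · rw [if_neg hu]
        simp only [List.append_nil]
        exact congrArg (fun v => (km, v)) (PySem.Set.ofList_append_singleton _ _).symm
    · rw [if_neg hk]
      have : (km ∈ u ++ [w]) ↔ (km ∈ u) := by simp [hk]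
      simp only [this]
  · -- a fresh key: A inserts an empty set, then adds nm to it
    have hwD : w ∉ PySem.List.dedup (pvStream reads ++ u) := by
      rwa [PySem.List.mem_dedup]
    have hc : (PySem.Dict.mk (pvH reads nm u)).contains w = false := by
      rw [Bool.eq_false_iff]
      intro h
      exact hwD ((pv_contains_mk_map_iff _ _ w).mp (by simpa only [pvH] using h))
    simp only [pvAdd, hc, Bool.false_eq_true, if_false]
    simp only [pvH]
    rw [pv_insert_mk_map_of_not_mem _ _ w hwD]
    -- re-express the appended dict as a map over D ++ [w]
    have hrepr : (PySem.List.dedup (pvStream reads ++ u)).map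
          (fun km => (km, PySem.Set.ofList (pvNames reads km ++ if km ∈ u then [nm] else [])))
          ++ [(w, [])] =
        (PySem.List.dedup (pvStream reads ++ u) ++ [w]).map
          (fun km => (km, if km = w then ([] : List String)
            else PySem.Set.ofList (pvNames reads km ++ if km ∈ u then [nm] else []))) := by
      rw [List.map_append]
      congr 1
      · apply List.map_congr_left
        intro km hkm
        rw [if_neg (fun (hh : km = w) => hwD (hh ▸ hkm))]
      · simp
    rw [hrepr]
    have hDw : (PySem.List.dedup (pvStream reads ++ u) ++ [w]).Nodup :=
      hD.append (List.nodup_singleton w)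
        (fun a ha hb => hwD ((List.mem_singleton.mp hb) ▸ ha))
    have hwmem : w ∈ PySem.List.dedup (pvStream reads ++ u) ++ [w] := by simp
    simp only [PySem.Dict.modify, PySem.Dict.getD]
    rw [pv_get?_mk_map_of_mem _ _ w hDw hwmem]
    rw [pv_insert_mk_map_of_mem _ _ w hwmem]
    simp only [if_pos rfl, Option.getD_some]
    have hdd : PySem.List.dedup (pvStream reads ++ (u ++ [w])) =
        PySem.List.dedup (pvStream reads ++ u) ++ [w] := by
      rw [← List.append_assoc]
      simp only [PySem.List.dedup_eq_ofList, PySem.Set.ofList_append_singleton]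
      exact PySem.Set.add_of_not_mem (by rwa [PySem.Set.mem_ofList])
    rw [hdd]
    congr 1
    apply List.map_congr_left
    intro km hkm
    rcases List.mem_append.mp hkm with hkm | hkm
    · have hk : km ≠ w := fun h => hwD (h ▸ hkm)
      rw [if_neg hk, if_neg hk]
      have : (km ∈ u ++ [w]) ↔ (km ∈ u) := by simp [hk]
      simp only [this]
    · have hk : km = w := by simpa using hkm
      subst hk
      have hnm : pvNames reads km = [] :=
        pvNames_eq_nil_of_not_mem_stream reads km
          (fun h => hw (List.mem_append.mpr (Or.inl h)))
      simp [hnm, PySem.Set.add, PySem.Set.ofList]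

lemma foldl_pvAdd (reads : List (String × List String)) (nm : String) (ws u : List String) :
    ws.foldl (pvAdd nm) ⟨pvH reads nm u⟩ = ⟨pvH reads nm (u ++ ws)⟩ := by
  induction ws generalizing u with
  | nil => simp
  | cons w ws ih =>
      simp only [List.foldl_cons, pvAdd_pvH]
      rw [ih (u ++ [w])]
      simp

lemma pvH_full (reads : List (String × List String)) (nm : String) (ws : List String) :
    pvH reads nm ws = pvTab (reads ++ [(nm, ws)]) := by
  simp only [pvH, pvTab, pvStream, List.flatMap_append, List.flatMap_cons, List.flatMap_nil,
    List.append_nil]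
  apply List.map_congr_left
  intro km hkm
  simp only [pvNames, List.filter_append, List.map_append, List.filter_cons, List.filter_nil]
  congr 2
  by_cases h : km ∈ ws
  · simp [h, List.contains_iff_mem]
  · simp [h, List.contains_iff_mem]

lemma build_eq (reads : List (String × List String)) :
    reads.foldl (fun d r => r.2.foldl (pvAdd r.1) d) PySem.Dict.empty = ⟨pvTab reads⟩ := by
  induction reads using List.reverseRecOn with
  | nil => simp [pvTab, pvStream, PySem.Dict.empty]
  | append_singleton rs r ih =>
      rw [List.foldl_append, ih]
      simp only [List.foldl_cons, List.foldl_nil]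
      rw [← pvH_nil rs r.1, foldl_pvAdd, List.nil_append, pvH_full]

lemma pv_get?_mk_append (pre rest : List (String × List String)) (w : String)
    (h : w ∉ pre.map Prod.fst) :
    (PySem.Dict.mk (pre ++ rest)).get? w = (PySem.Dict.mk rest).get? w := by
  induction pre with
  | nil => rfl
  | cons p pre ih =>
      obtain ⟨pk, pv⟩ := p
      simp only [List.map_cons, List.mem_cons, not_or] at h
      rw [List.cons_append, PySem.Dict.get?_mk_cons]
      rw [if_neg (by simp only [beq_iff_eq]; exact fun hh => h.1 hh.symm)]
      exact ih h.2

-- the deletion pass over a snapshot of the keys filters the item list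
lemma del_aux (l pre : List (String × List String))
    (h : ((pre ++ l).map Prod.fst).Nodup) :
    (l.map Prod.fst).foldl pvDel ⟨pre ++ l⟩ =
      ⟨pre ++ l.filter (fun p => decide (¬ p.2.length < 2))⟩ := by
  induction l generalizing pre with
  | nil => simp
  | cons p t ih =>
      obtain ⟨pk, pv⟩ := p
      have h' : (pre.map Prod.fst ++ pk :: t.map Prod.fst).Nodup := by simpa using h
      have hkpre : pk ∉ pre.map Prod.fst :=
        fun hm => (List.disjoint_of_nodup_append h') hm (by simp)
      have hkt : pk ∉ t.map Prod.fst :=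
        (List.nodup_cons.mp (h'.of_append_right)).1
      have hget : (PySem.Dict.mk (pre ++ (pk, pv) :: t)).getD pk [] = pv := by
        simp only [PySem.Dict.getD]
        rw [pv_get?_mk_append pre _ pk hkpre, PySem.Dict.get?_mk_cons]
        simp
      simp only [List.map_cons, List.foldl_cons]
      by_cases hsmall : pv.length < 2
      · have hstep : pvDel ⟨pre ++ (pk, pv) :: t⟩ pk = ⟨pre ++ t⟩ := by
          simp only [pvDel, hget, if_pos hsmall, PySem.Dict.erase, PySem.Dict.items]
          congr 1
          rw [List.filter_append, List.filter_cons]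
          have h1 : pre.filter (fun p => !(p.1 == pk)) = pre := by
            apply List.filter_eq_self.mpr
            intro p hp
            simp only [Bool.not_eq_true', beq_eq_false_iff_ne, ne_eq]
            exact fun hh => hkpre (hh ▸ List.mem_map_of_mem hp)
          have h2 : t.filter (fun p => !(p.1 == pk)) = t := by
            apply List.filter_eq_self.mpr
            intro p hp
            simp only [Bool.not_eq_true', beq_eq_false_iff_ne, ne_eq]
            exact fun hh => hkt (hh ▸ List.mem_map_of_mem hp)
          simp [h1, h2]
        rw [hstep]
        have hnd : ((pre ++ t).map Prod.fst).Nodup := by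
          have hsub : List.Sublist (pre ++ t) (pre ++ (pk, pv) :: t) :=
            List.Sublist.append_left (List.sublist_cons_self _ _) pre
          exact List.Nodup.sublist (hsub.map Prod.fst) h
        rw [ih pre hnd]
        have : decide (¬ pv.length < 2) = false := by simp [hsmall]
        simp only [List.filter_cons, this, Bool.false_eq_true, if_false]
      · have hstep : pvDel ⟨pre ++ (pk, pv) :: t⟩ pk = ⟨pre ++ (pk, pv) :: t⟩ := by
          simp only [pvDel, hget, if_neg hsmall]
        rw [hstep]
        have hassoc : pre ++ (pk, pv) :: t = (pre ++ [(pk, pv)]) ++ t := by simp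
        rw [hassoc]
        have hnd : (((pre ++ [(pk, pv)]) ++ t).map Prod.fst).Nodup := by
          rw [← hassoc]; exact h
        rw [ih (pre ++ [(pk, pv)]) hnd]
        have : decide (¬ pv.length < 2) = true := by simp [hsmall]
        simp only [List.filter_cons, this, if_true]
        simp

-- the two ports, re-expressed over the shared read/window list
lemma portA_eq (seqs : List (String × String)) (k : Int) :
    make_kmer_table seqs k =
      (((seqs.map (pvWin k)).foldl (fun d r => r.2.foldl (pvAdd r.1) d)
          PySem.Dict.empty).keys.foldl pvDel
        ((seqs.map (pvWin k)).foldl (fun d r => r.2.foldl (pvAdd r.1) d)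
          PySem.Dict.empty)).items := by
  simp only [make_kmer_table, pvWin, pvAdd, List.foldl_map]
  rfl

lemma portB_eq (seqs : List (String × String)) (k : Int) :
    make_kmer_table_alt seqs k =
      ((PySem.List.dedup (pvStream (seqs.map (pvWin k)))).filter
          (fun km => decide (2 ≤ (pvNames (seqs.map (pvWin k)) km).length))).map
        (fun km => (km, PySem.Set.ofList (pvNames (seqs.map (pvWin k)) km))) := by
  have hB : make_kmer_table_alt seqs k =
      (PySem.List.dedup (pvStream (seqs.map (pvWin k)))).foldl
        (fun table km => if 2 ≤ (pvNames (seqs.map (pvWin k)) km).length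
          then table ++ [(km, PySem.Set.ofList (pvNames (seqs.map (pvWin k)) km))] else table)
        [] := rfl
  rw [hB, PySem.List.foldl_append_ite]
  simp

theorem make_kmer_table_spec : Claim_equal_make_kmer_table := by
  intro seqs k _ hpre
  unfold Spec_make_kmer_table
  have hRfst : (seqs.map (pvWin k)).map Prod.fst = seqs.map Prod.fst := by
    simp [pvWin, List.map_map, Function.comp]
  have hnames : ∀ km, (pvNames (seqs.map (pvWin k)) km).Nodup := by
    intro km
    have hsub : List.Sublist (pvNames (seqs.map (pvWin k)) km)
        ((seqs.map (pvWin k)).map (fun r => r.1)) :=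
      List.Sublist.map _ List.filter_sublist
    exact List.Nodup.sublist hsub (by rw [hRfst]; exact hpre)
  have htabfst : (pvTab (seqs.map (pvWin k))).map Prod.fst =
      PySem.List.dedup (pvStream (seqs.map (pvWin k))) := by
    simp [pvTab, List.map_map, Function.comp_def]
  have hkeys : (PySem.Dict.mk (pvTab (seqs.map (pvWin k)))).keys =
      (pvTab (seqs.map (pvWin k))).map Prod.fst := rfl
  have hdel := del_aux (pvTab (seqs.map (pvWin k))) []
    (by simpa [htabfst] using PySem.List.nodup_dedup (pvStream (seqs.map (pvWin k))))
  simp only [List.nil_append] at hdel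
  rw [portA_eq, build_eq, hkeys, hdel, portB_eq]
  show (pvTab (seqs.map (pvWin k))).filter _ = _
  rw [pvTab, List.filter_map]
  congr 1
  apply List.filter_congr
  intro km _
  simp only [Function.comp]
  have hself : PySem.Set.ofList (pvNames (seqs.map (pvWin k)) km) =
      pvNames (seqs.map (pvWin k)) km :=
    PySem.Set.ofList_eq_self_of_nodup _ (hnames km)
  simp only [decide_eq_decide]
  rw [hself]
  omega
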